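-- pv_equiv track=rewrite | github.com/Mxtsi7/grafos | src/algoritmos.py | obtener_todas_rutas
-- ===== SOURCE A (Python) =====
-- import itertools
--
-- def obtener_todas_rutas(n_ciudades, max_rutas=None):
--     """
--     Genera todas las rutas posibles (útil para animaciones).
--
--     Args:
--         n_ciudades: Número de ciudades
--         max_rutas: Máximo número de rutas a generar (None = todas)
--
--     Returns:
--         list: Lista de todas las rutas
--     """
--     ciudades = list(range(n_ciudades))
--     ciudad_inicial = ciudades[0]
--     ciudades_restantes = ciudades[1:]
--
--     todas_rutas = []
--
--     for i, permutacion in enumerate(itertools.permutations(ciudades_restantes)):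
--         if max_rutas and i >= max_rutas:
--             break
--         ruta = [ciudad_inicial] + list(permutacion)
--         todas_rutas.append(ruta)
--
--     return todas_rutas
-- ===== SOURCE B (Python) =====
-- def siguiente_permutacion(p):
--     """Permutacion lexicograficamente siguiente de p, o None si p es la ultima.
--     Separa el sufijo no creciente (queda en 'derecha', ascendente), cambia el
--     pivote por su sucesor dentro del sufijo y pega todo de vuelta."""
--     izquierda = list(p)
--     derecha = []
--     if izquierda:
--         derecha.append(izquierda.pop())
--     while izquierda and izquierda[-1] >= derecha[-1]:
--         derecha.append(izquierda.pop())
--     if not izquierda: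
--         return None
--     pivote = izquierda.pop()
--     k = 0
--     while derecha[k] <= pivote:
--         k += 1
--     pivote, derecha[k] = derecha[k], pivote
--     return izquierda + [pivote] + derecha
--
--
-- def obtener_todas_rutas(n_ciudades, max_rutas=None):
--     """Genera las rutas avanzando de permutacion en permutacion en orden
--     lexicografico (algoritmo clasico de la permutacion siguiente), con corte
--     cuando ya hay max_rutas resultados (max_rutas falsy = sin limite)."""
--     ciudades = list(range(n_ciudades))
--     inicial = ciudades[0]
--     actual = ciudades[1:]
--     resultados = []
--     while not (max_rutas and len(resultados) >= max_rutas):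
--         resultados.append([inicial] + actual)
--         actual = siguiente_permutacion(actual)
--         if actual is None:
--             break
--     return resultados
-- ===== Notes on version B (the rewrite author's own statement) =====
-- stated objective: alternative
-- what changed: B replaces itertools.permutations plus an enumerate/break loop by repeatedly computing the lexicographic next permutation (classic successor algorithm) of the remaining cities, collecting routes until the chain ends or max_rutas results are gathered; Pre_ excludes n_ciudades <= 0, where A's ciudades[0] raises IndexError.
import Mathlib
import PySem

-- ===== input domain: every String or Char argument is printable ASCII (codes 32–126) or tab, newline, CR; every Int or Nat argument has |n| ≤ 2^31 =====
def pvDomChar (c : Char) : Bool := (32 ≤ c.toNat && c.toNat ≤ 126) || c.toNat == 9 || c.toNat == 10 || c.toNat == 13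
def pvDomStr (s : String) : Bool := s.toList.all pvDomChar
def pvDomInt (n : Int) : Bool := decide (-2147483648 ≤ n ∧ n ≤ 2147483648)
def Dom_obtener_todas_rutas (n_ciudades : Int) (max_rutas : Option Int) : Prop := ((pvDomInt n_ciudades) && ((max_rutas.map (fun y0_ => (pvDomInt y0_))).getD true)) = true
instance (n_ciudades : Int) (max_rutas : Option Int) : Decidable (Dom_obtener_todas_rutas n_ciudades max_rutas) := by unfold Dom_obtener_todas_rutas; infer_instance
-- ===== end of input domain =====

-- B generates the routes by stepping from each permutation to its lexicographic
-- successor (classic next-permutation algorithm) instead of consuming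
-- itertools.permutations with an enumerate/break loop (objective: alternative).

-- 'max_rutas and <count> >= max_rutas' — the Python truthy cap test, identical in both sources
def pvTruthyCap (maxr : Option Int) (k : Nat) : Bool :=
  match maxr with
  | none => false
  | some m => m ≠ 0 && m ≤ (k : Int)

-- ===== PORT A =====
-- A consumes itertools.permutations of cities 1..n-1 lazily, enumerating with
-- 'if max_rutas and i >= max_rutas: break'. The iterator is lazy, so the port fuses
-- the break with the generation (the recursion scheme of PySem.List.permutations):
-- once the break has fired, nothing further of the iterator is forced.

-- enumerate(itertools.permutations(xs)) consumed up to the break; r = len(xs);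
-- returns (permutations yielded and kept, the next enumerate index i)
def pvGenA (maxr : Option Int) : Nat -> List Int -> Nat -> List (List Int) × Nat
  | 0, _, i => if pvTruthyCap maxr i then ([], i) else ([[]], i + 1)
  | r + 1, xs, i =>
      (List.range xs.length).foldl
        (fun acc idx =>
          if pvTruthyCap maxr acc.2 then acc  -- the break: the iterator is not forced further
          else
            match xs[idx]? with
            | none => acc   -- unreachable: idx < len(xs)
            | some v =>
              let s := pvGenA maxr r (xs.eraseIdx idx) acc.2
              (acc.1 ++ s.1.map (fun p => v :: p), s.2))
        ([], i)

def obtener_todas_rutas (n_ciudades : Int) (max_rutas : Option Int) : List (List Int) :=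
  let ciudades := PySem.List.pyRange 0 n_ciudades 1
  match PySem.List.pyGet? ciudades 0 with
  | none => []  -- ciudades[0] raises IndexError in Python (n_ciudades ≤ 0); excluded by Pre_
  | some c0 =>
    let restantes := PySem.List.slice ciudades (some 1) none
    -- 'ruta = [ciudad_inicial] + list(permutacion)', appended per yielded permutation
    ((pvGenA max_rutas restantes.length restantes 0).1).map (fun p => c0 :: p)

-- ===== PORT B =====
-- siguiente_permutacion, step for step.
-- 'while izquierda and izquierda[-1] >= derecha[-1]: derecha.append(izquierda.pop())';
-- fuel = len(izquierda), each iteration pops one element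
def pvPopRun : Nat -> List Int -> List Int -> List Int × List Int
  | 0, izq, der => (izq, der)
  | f + 1, izq, der =>
    match izq.getLast?, der.getLast? with
    | some x, some d => if x ≥ d then pvPopRun f izq.dropLast (der ++ [x]) else (izq, der)
    | _, _ => (izq, der)

-- 'while derecha[k] <= pivote: k += 1'; fuel = len(derecha) (a successor exists in context)
def pvFindK (der : List Int) (piv : Int) : Nat -> Nat -> Nat
  | 0, k => k   -- unreachable in context: Python would raise IndexError past the end
  | f + 1, k => if der.getD k 0 ≤ piv then pvFindK der piv f (k + 1) else k

def pvSigPerm (p : List Int) : Option (List Int) :=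
  match p.getLast? with
  | none => none  -- p empty: the initial pop never happens, 'if not izquierda: return None'
  | some x =>
    let st := pvPopRun p.dropLast.length p.dropLast [x]
    match st.1.getLast? with
    | none => none  -- 'if not izquierda: return None'
    | some piv =>
      let izq := st.1.dropLast          -- 'pivote = izquierda.pop()'
      let der := st.2
      let k := pvFindK der piv der.length 0
      -- 'pivote, derecha[k] = derecha[k], pivote; return izquierda + [pivote] + derecha'
      some (izq ++ [der.getD k 0] ++ der.set k piv)

-- the while loop of obtener_todas_rutas; fuel = len(actual)! bounds the number of iterations
def pvLoop (maxr : Option Int) (inicial : Int) : Nat -> List Int -> List (List Int) -> List (List Int)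
  | 0, _, res => res  -- unreachable: the chain of successors ends within len(actual)! steps
  | f + 1, actual, res =>
    if pvTruthyCap maxr res.length then res   -- 'while not (max_rutas and len(resultados) >= max_rutas)'
    else
      let res' := res ++ [inicial :: actual]  -- 'resultados.append([inicial] + actual)'
      match pvSigPerm actual with
      | none => res'                          -- 'if actual is None: break'
      | some a' => pvLoop maxr inicial f a' res'

def obtener_todas_rutas_alt (n_ciudades : Int) (max_rutas : Option Int) : List (List Int) :=
  let ciudades := PySem.List.pyRange 0 n_ciudades 1
  match PySem.List.pyGet? ciudades 0 with
  | none => []  -- ciudades[0] raises IndexError in Python (n_ciudades ≤ 0); excluded by Pre_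
  | some inicial =>
    let actual := PySem.List.slice ciudades (some 1) none
    pvLoop max_rutas inicial (Nat.factorial actual.length) actual []

-- ===== PRECONDITION & SPEC =====
-- Pre_ excludes n_ciudades ≤ 0, where Python's 'ciudades[0]' raises IndexError (in A and B alike).
def Pre_obtener_todas_rutas (n_ciudades : Int) (max_rutas : Option Int) : Prop :=
  1 ≤ n_ciudades
instance (n_ciudades : Int) (max_rutas : Option Int) : Decidable (Pre_obtener_todas_rutas n_ciudades max_rutas) := by
  unfold Pre_obtener_todas_rutas; infer_instance
def pvWitness_obtener_todas_rutas : Int × Option Int := (4, some 5)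

def Spec_obtener_todas_rutas (n_ciudades : Int) (max_rutas : Option Int) (out : List (List Int)) : Prop := out = obtener_todas_rutas_alt n_ciudades max_rutas
instance (n_ciudades : Int) (max_rutas : Option Int) (out : List (List Int)) : Decidable (Spec_obtener_todas_rutas n_ciudades max_rutas out) := by unfold Spec_obtener_todas_rutas; infer_instance

-- ===== CLAIM (what is proved, stated in full; the proofs are below) =====
def Claim_equal_obtener_todas_rutas : Prop := ∀ (n_ciudades : Int) (max_rutas : Option Int), Dom_obtener_todas_rutas n_ciudades max_rutas → Pre_obtener_todas_rutas n_ciudades max_rutas → Spec_obtener_todas_rutas n_ciudades max_rutas (obtener_todas_rutas n_ciudades max_rutas)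

-- ===== LEMMAS AND PROOFS =====

-- ---- the capped prefix: how many further results the cap allows from k results on ----
def pvCapTake (maxr : Option Int) (k : Nat) (l : List (List Int)) : List (List Int) :=
  match maxr with
  | none => l
  | some m => if m = 0 then l else l.take (m - (k : Int)).toNat

lemma pvCapTake_of_reached (maxr : Option Int) (k : Nat)
    (h : pvTruthyCap maxr k = true) : ∀ (l : List (List Int)), pvCapTake maxr k l = [] := by
  intro l
  cases maxr with
  | none => simp [pvTruthyCap] at h
  | some m =>
    simp [pvTruthyCap] at h
    simp [pvCapTake, h.1]
    omega

lemma pvCapTake_append (maxr : Option Int) (k : Nat) (l1 l2 : List (List Int)) :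
    pvCapTake maxr k (l1 ++ l2)
      = pvCapTake maxr k l1 ++ pvCapTake maxr (k + (pvCapTake maxr k l1).length) l2 := by
  cases maxr with
  | none => simp [pvCapTake]
  | some m =>
    by_cases hm : m = 0
    · simp [pvCapTake, hm]
    · simp only [pvCapTake, if_neg hm]
      rw [List.take_append]
      congr 1
      rw [List.length_take]
      congr 1
      omega

lemma pvCapTake_nil (maxr : Option Int) (k : Nat) : pvCapTake maxr k [] = [] := by
  cases maxr <;> simp [pvCapTake]

lemma pvCapTake_singleton_not_reached (maxr : Option Int) (k : Nat) (a : List Int)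
    (h : pvTruthyCap maxr k = false) : pvCapTake maxr k [a] = [a] := by
  cases maxr with
  | none => rfl
  | some m =>
    simp [pvTruthyCap] at h
    by_cases hm : m = 0
    · simp [pvCapTake, hm]
    · simp [pvCapTake, hm]
      have := h hm
      omega

lemma pvCapTake_map (maxr : Option Int) (k : Nat) (l : List (List Int)) (g : List Int → List Int) :
    (pvCapTake maxr k l).map g = pvCapTake maxr k (l.map g) := by
  cases maxr with
  | none => rfl
  | some m =>
    by_cases hm : m = 0 <;> simp [pvCapTake, hm, List.map_take]

lemma pvCapTake_cons (maxr : Option Int) (k : Nat) (a : List Int) (l : List (List Int))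
    (h : pvTruthyCap maxr k = false) :
    pvCapTake maxr k (a :: l) = a :: pvCapTake maxr (k + 1) l := by
  have := pvCapTake_append maxr k [a] l
  rw [pvCapTake_singleton_not_reached maxr k a h] at this
  simpa using this

-- ---- the A side: pvGenA computes the capped prefix of PySem.List.permutations ----
lemma pvPerm_succ (xs : List Int) (r : Nat) :
    PySem.List.permutations xs (r + 1)
      = (List.range xs.length).flatMap (fun idx =>
          (xs[idx]?).elim []
            (fun v => (PySem.List.permutations (xs.eraseIdx idx) r).map (fun p => v :: p))) := by
  simp only [PySem.List.permutations]
  congr 1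
  funext idx
  cases xs[idx]? <;> rfl

lemma pvGenA_eq (maxr : Option Int) :
    ∀ (r : Nat) (xs : List Int), xs.length = r → ∀ (i : Nat),
      pvGenA maxr r xs i
        = (pvCapTake maxr i (PySem.List.permutations xs r),
           i + (pvCapTake maxr i (PySem.List.permutations xs r)).length) := by
  intro r
  induction r with
  | zero =>
    intro xs hx i
    have : xs = [] := List.eq_nil_of_length_eq_zero hx
    subst this
    by_cases hb : pvTruthyCap maxr i
    · simp [pvGenA, hb, PySem.List.permutations, pvCapTake_of_reached _ _ hb _]
    · simp only [Bool.not_eq_true] at hb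
      simp [pvGenA, hb, PySem.List.permutations,
            pvCapTake_singleton_not_reached _ _ _ hb]
  | succ r ih =>
    intro xs hx i
    obtain ⟨x, xs', rfl⟩ : ∃ x xs', xs = x :: xs' := by
      cases xs with
      | nil => simp at hx
      | cons a l => exact ⟨_, _, rfl⟩
    have hlen' : xs'.length = r := by simpa using hx
    have inner : ∀ (idxs : List Nat), (∀ j ∈ idxs, j < (x :: xs').length) →
        ∀ (acc1 : List (List Int)) (j : Nat),
          idxs.foldl (fun acc idx =>
              if pvTruthyCap maxr acc.2 then acc
              else
                match (x :: xs')[idx]? with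
                | none => acc
                | some v =>
                  let s := pvGenA maxr r ((x :: xs').eraseIdx idx) acc.2
                  (acc.1 ++ s.1.map (fun p => v :: p), s.2)) (acc1, j)
          = (acc1 ++ pvCapTake maxr j (idxs.flatMap (fun idx =>
                ((x :: xs')[idx]?).elim []
                  (fun v => (PySem.List.permutations ((x :: xs').eraseIdx idx) r).map
                    (fun p => v :: p)))),
             j + (pvCapTake maxr j (idxs.flatMap (fun idx =>
                ((x :: xs')[idx]?).elim []
                  (fun v => (PySem.List.permutations ((x :: xs').eraseIdx idx) r).map
                    (fun p => v :: p))))).length) := by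
      intro idxs
      induction idxs with
      | nil => intro _ acc1 j; simp [pvCapTake_nil]
      | cons idx is ihi =>
        intro hmem acc1 j
        have hidx : idx < (x :: xs').length := hmem idx (by simp)
        simp only [List.foldl_cons, List.flatMap_cons]
        rw [List.getElem?_eq_getElem hidx]
        simp only [Option.elim_some]
        by_cases hb : pvTruthyCap maxr j
        · simp only [hb, if_true]
          rw [ihi (fun a ha => hmem a (by simp [ha])) acc1 j]
          rw [pvCapTake_append]
          simp [pvCapTake_of_reached maxr j hb]
        · simp only [hb, if_neg, Bool.false_eq_true, not_false_eq_true]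
          rw [ih ((x :: xs').eraseIdx idx)
                (by rw [List.length_eraseIdx_of_lt hidx]; simpa using hx) j]
          simp only []
          rw [ihi (fun a ha => hmem a (by simp [ha]))]
          rw [pvCapTake_map, pvCapTake_append]
          have hl : (pvCapTake maxr j ((PySem.List.permutations ((x :: xs').eraseIdx idx) r).map
                (fun p => (x :: xs')[idx] :: p))).length
              = (pvCapTake maxr j (PySem.List.permutations ((x :: xs').eraseIdx idx) r)).length := by
            rw [← pvCapTake_map]; simp
          simp only [List.length_append, List.append_assoc, hl, Prod.mk.injEq]
          exact ⟨trivial, by omega⟩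
    have : pvGenA maxr (r + 1) (x :: xs') i
        = (List.range (x :: xs').length).foldl (fun acc idx =>
              if pvTruthyCap maxr acc.2 then acc
              else
                match (x :: xs')[idx]? with
                | none => acc
                | some v =>
                  let s := pvGenA maxr r ((x :: xs').eraseIdx idx) acc.2
                  (acc.1 ++ s.1.map (fun p => v :: p), s.2)) ([], i) := by
      simp [pvGenA]
    rw [this, inner (List.range (x :: xs').length) (fun a ha => List.mem_range.mp ha) [] i]
    rw [pvPerm_succ]
    simp

-- ---- the B side: structural view of siguiente_permutacion ----
-- pvPopR: the pop loop seen on the reversed lists (heads = the ends Python touches)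
def pvPopR : List Int -> List Int -> List Int × List Int
  | [], derR => ([], derR)
  | x :: rest, derR =>
    match derR with
    | [] => (x :: rest, derR)
    | d :: _ => if x ≥ d then pvPopR rest (x :: derR) else (x :: rest, derR)

lemma pvPopRun_eq_popR : ∀ (rz : List Int) (derR : List Int),
    pvPopRun rz.length rz.reverse derR.reverse
      = ((pvPopR rz derR).1.reverse, (pvPopR rz derR).2.reverse) := by
  intro rz
  induction rz with
  | nil => intro derR; simp [pvPopRun, pvPopR]
  | cons x rest ih =>
    intro derR
    show pvPopRun (rest.length + 1) ((x :: rest).reverse) derR.reverse = _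
    have h1 : (x :: rest).reverse = rest.reverse ++ [x] := by simp
    rw [h1]
    simp only [pvPopRun, List.getLast?_concat]
    cases derR with
    | nil => simp [pvPopR]
    | cons d t =>
      have h2 : (d :: t).reverse.getLast? = some d := by
        simp [List.getLast?_reverse]
      rw [h2]
      by_cases hge : x ≥ d
      · simp only [hge, if_pos, List.dropLast_concat]
        have h3 : (d :: t).reverse ++ [x] = (x :: d :: t).reverse := by simp
        rw [h3, ih (x :: d :: t)]
        simp [pvPopR, hge]
      · simp only [hge, if_neg, not_false_eq_true]
        simp [pvPopR, hge, h1]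

lemma pvSigPerm_nil : pvSigPerm [] = none := rfl

-- pvSigPerm through pvPopR: the stopped case
lemma pvSigPerm_rev_none (x : Int) (rz : List Int) (derR : List Int)
    (h : pvPopR rz [x] = ([], derR)) :
    pvSigPerm ((x :: rz).reverse) = none := by
  have h1 : (x :: rz).reverse = rz.reverse ++ [x] := by simp
  rw [h1]
  unfold pvSigPerm
  simp only [List.getLast?_concat, List.dropLast_concat, List.length_reverse]
  have hb := pvPopRun_eq_popR rz [x]
  simp only [show ([x] : List Int).reverse = [x] from rfl] at hb
  rw [hb, h]
  simp

-- pvSigPerm through pvPopR: the successful case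
lemma pvSigPerm_rev_some (x : Int) (rz : List Int) (piv : Int) (izqR derR : List Int)
    (h : pvPopR rz [x] = (piv :: izqR, derR)) :
    pvSigPerm ((x :: rz).reverse)
      = some (izqR.reverse
          ++ [derR.reverse.getD (pvFindK derR.reverse piv derR.reverse.length 0) 0]
          ++ derR.reverse.set (pvFindK derR.reverse piv derR.reverse.length 0) piv) := by
  have h1 : (x :: rz).reverse = rz.reverse ++ [x] := by simp
  rw [h1]
  unfold pvSigPerm
  simp only [List.getLast?_concat, List.dropLast_concat, List.length_reverse]
  have hb := pvPopRun_eq_popR rz [x]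
  simp only [show ([x] : List Int).reverse = [x] from rfl] at hb
  rw [hb, h]
  have h2 : (piv :: izqR).reverse.getLast? = some piv := by
    simp [List.getLast?_reverse]
  simp only [h2]
  simp

-- the pop loop consumes a non-decreasing run wholesale
lemma pvPopR_prefix : ∀ (m : List Int) (rest : List Int) (d : Int) (tl : List Int),
    List.Pairwise (· ≤ ·) (d :: m) →
    pvPopR (m ++ rest) (d :: tl) = pvPopR rest (m.reverse ++ d :: tl) := by
  intro m
  induction m with
  | nil => intro rest d tl _; simp
  | cons y m' ih =>
    intro rest d tl hp
    have hdy : d ≤ y := (List.pairwise_cons.mp hp).1 y (by simp)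
    have hp' : List.Pairwise (· ≤ ·) (y :: m') := (List.pairwise_cons.mp hp).2
    show pvPopR (y :: (m' ++ rest)) (d :: tl) = _
    simp only [pvPopR, ge_iff_le, hdy, if_pos]
    rw [ih rest y (d :: tl) hp']
    simp

-- extending the scanned list past a stop point changes nothing but the leftover
lemma pvPopR_extend : ∀ (rz : List Int) (extra der : List Int),
    (pvPopR rz der).1 ≠ [] →
    pvPopR (rz ++ extra) der = ((pvPopR rz der).1 ++ extra, (pvPopR rz der).2) := by
  intro rz
  induction rz with
  | nil => intro extra der h; simp [pvPopR] at h
  | cons x rest ih =>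
    intro extra der h
    cases der with
    | nil => simp [pvPopR]
    | cons d t =>
      by_cases hge : x ≥ d
      · simp only [List.cons_append, pvPopR, hge, if_pos] at h ⊢
        exact ih extra (x :: d :: t) h
      · simp [pvPopR, hge]

lemma pvFindK_eq (der : List Int) (v : Int) (j : Nat)
    (hj : j < der.length)
    (hlt : ∀ i, i < j → der.getD i 0 ≤ v)
    (hgt : v < der.getD j 0) :
    ∀ (f k : Nat), k ≤ j → j < k + f → pvFindK der v f k = j := by
  intro f
  induction f with
  | zero => intro k h1 h2; omega
  | succ f ih =>
    intro k h1 h2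
    by_cases hkj : k = j
    · subst hkj
      simp only [pvFindK]
      rw [if_neg (by omega)]
    · have hklt : k < j := by omega
      simp only [pvFindK]
      rw [if_pos (hlt k hklt)]
      exact ih (k + 1) (by omega) (by omega)

-- cons lift: a successor inside the tail is untouched by a new head
lemma pvSigPerm_cons (v : Int) (p q : List Int) (h : pvSigPerm p = some q) :
    pvSigPerm (v :: p) = some (v :: q) := by
  cases hp : p.reverse with
  | nil =>
    have : p = [] := by simpa using congrArg List.reverse hp
    subst this; simp [pvSigPerm_nil] at h
  | cons x rz =>
    have hpe : p = (x :: rz).reverse := by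
      rw [← hp, List.reverse_reverse]
    cases hpop : pvPopR rz [x] with
    | mk izq1 derR =>
      cases izq1 with
      | nil =>
        rw [hpe, pvSigPerm_rev_none x rz derR hpop] at h
        exact absurd h (by simp)
      | cons piv izqR =>
        rw [hpe, pvSigPerm_rev_some x rz piv izqR derR hpop] at h
        have hvp : v :: p = (x :: (rz ++ [v])).reverse := by
          rw [hpe]; simp
        have hext : pvPopR (rz ++ [v]) [x] = (piv :: (izqR ++ [v]), derR) := by
          have := pvPopR_extend rz [v] [x] (by rw [hpop]; simp)
          rw [hpop] at this
          simpa using this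
        rw [hvp, pvSigPerm_rev_some x (rz ++ [v]) piv (izqR ++ [v]) derR hext]
        injection h with h
        rw [← h]
        simp

-- block glue: from v before a descending tail, the successor starts the next block
lemma pvSigPerm_block (v b : Int) (t₁ t₂ : List Int)
    (hs : List.Pairwise (· < ·) (t₁ ++ b :: t₂))
    (h₁ : ∀ a ∈ t₁, a < v) (hvb : v < b) :
    pvSigPerm (v :: (t₁ ++ b :: t₂).reverse) = some (b :: (t₁ ++ v :: t₂)) := by
  set t : List Int := t₁ ++ b :: t₂ with ht
  obtain ⟨c, t', htc⟩ : ∃ c t', t = c :: t' := by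
    cases h : t with
    | nil => rw [ht] at h; exact absurd h (by simp)
    | cons c t' => exact ⟨c, t', rfl⟩
  -- v :: t.reverse = (c :: (t' ++ [v])).reverse
  have hshape : v :: t.reverse = (c :: (t' ++ [v])).reverse := by
    rw [htc]; simp
  -- the pop loop consumes t' then stops at v (v < every element of the non-empty suffix)
  have hple : List.Pairwise (· ≤ ·) (c :: t') := by
    rw [← htc]; exact hs.imp le_of_lt
  have hpop1 : pvPopR (t' ++ [v]) [c] = pvPopR [v] (t'.reverse ++ [c]) :=
    pvPopR_prefix t' [v] c [] hple
  have hrev : t'.reverse ++ [c] = t.reverse := by rw [htc]; simp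
  -- v is smaller than the head of t.reverse (= the last element of t)
  have hlast : ∃ M rest', t.reverse = M :: rest' ∧ v < M := by
    have hne : (b :: t₂) ≠ [] := by simp
    have hgl : t.getLast? = (b :: t₂).getLast? := by
      rw [ht]; exact List.getLast?_append_of_ne_nil t₁ hne
    obtain ⟨M, hM⟩ : ∃ M, (b :: t₂).getLast? = some M :=
      ⟨(b :: t₂).getLast hne, List.getLast?_eq_some_getLast hne⟩
    have hMmem : M ∈ b :: t₂ := List.mem_of_getLast? hM
    have hvM : v < M := by
      rcases List.mem_cons.mp hMmem with h | h
      · omega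
      · have hbt : List.Pairwise (· < ·) (b :: t₂) := by
          have : (b :: t₂).Sublist t := by rw [ht]; exact List.sublist_append_right _ _
          exact hs.sublist this
        have : b < M := (List.pairwise_cons.mp hbt).1 M h
        omega
    have : t.reverse.head? = some M := by
      rw [List.head?_reverse, hgl]
      exact hM
    obtain ⟨rest', hr⟩ : ∃ rest', t.reverse = M :: rest' := by
      cases hrv : t.reverse with
      | nil => rw [hrv] at this; simp at this
      | cons a l => rw [hrv] at this; simp at this; exact ⟨l, by rw [this]⟩
    exact ⟨M, rest', hr, hvM⟩
  obtain ⟨M, rest', hMr, hvM⟩ := hlast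
  have hpop2 : pvPopR [v] (t.reverse) = ([v], t.reverse) := by
    rw [hMr]
    simp [pvPopR, show ¬ (v ≥ M) by omega]
  have hpop : pvPopR (t' ++ [v]) [c] = ([v], t.reverse) := by
    rw [hpop1, hrev, hpop2]
  rw [hshape, pvSigPerm_rev_some c (t' ++ [v]) v [] t.reverse hpop]
  rw [List.reverse_reverse]
  -- the successor index is t₁.length
  have hj' : t₁.length < t.length := by rw [ht]; simp
  have hlt' : ∀ i, i < t₁.length → t.getD i 0 ≤ v := by
    intro i hi
    rw [ht, List.getD_append _ _ _ _ hi]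
    have hmem : t₁.getD i 0 ∈ t₁ := by
      rw [List.getD_eq_getElem _ _ hi]
      exact List.getElem_mem hi
    exact le_of_lt (h₁ _ hmem)
  have hgt' : v < t.getD t₁.length 0 := by
    rw [ht, List.getD_append_right t₁ (b :: t₂) 0 t₁.length (Nat.le_refl _)]
    simp [hvb]
  have hk : pvFindK t v t.length 0 = t₁.length :=
    pvFindK_eq t v t₁.length hj' hlt' hgt' t.length 0 (Nat.zero_le _) (by omega)
  rw [hk]
  have hget : t.getD t₁.length 0 = b := by
    rw [ht, List.getD_append_right t₁ (b :: t₂) 0 t₁.length (Nat.le_refl _)]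
    simp
  have hset : t.set t₁.length v = t₁ ++ v :: t₂ := by
    rw [ht, List.set_append_right t₁.length v (Nat.le_refl _)]
    simp
  rw [hget, hset]
  simp

-- ---- the successor chain ----
def pvIterN : Nat -> List Int -> Option (List Int)
  | 0, p => some p
  | k + 1, p => (pvSigPerm p).bind (pvIterN k)

def pvChainF : Nat -> List Int -> List (List Int)
  | 0, _ => []
  | f + 1, p => p :: (match pvSigPerm p with
      | none => []
      | some q => pvChainF f q)

lemma pvIterN_add (a b : Nat) (p : List Int) :
    pvIterN (a + b) p = (pvIterN a p).bind (pvIterN b) := by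
  induction a generalizing p with
  | zero => simp [pvIterN]
  | succ a ih =>
    have h : a + 1 + b = (a + b) + 1 := by omega
    rw [h]
    simp only [pvIterN]
    cases hp : pvSigPerm p with
    | none => simp
    | some q => simp [ih q]

lemma pvChainF_split (a b : Nat) (p q : List Int) (h : pvIterN a p = some q) :
    pvChainF (a + b) p = pvChainF a p ++ pvChainF b q := by
  induction a generalizing p with
  | zero =>
    simp only [pvIterN] at h
    cases h
    simp [pvChainF]
  | succ a ih =>
    simp only [pvIterN] at h
    cases hp : pvSigPerm p with
    | none => rw [hp] at h; simp at h
    | some p₁ =>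
      rw [hp] at h
      simp only [Option.bind_some] at h
      have hstep : a + 1 + b = (a + b) + 1 := by omega
      rw [hstep]
      simp only [pvChainF, hp]
      rw [ih p₁ h]
      simp

lemma pvChainF_one (p : List Int) : pvChainF 1 p = [p] := by
  simp only [pvChainF]
  cases pvSigPerm p <;> rfl

lemma pvChain_cons (v : Int) : ∀ (k : Nat) (p q : List Int), pvIterN k p = some q →
    pvIterN k (v :: p) = some (v :: q)
    ∧ pvChainF (k + 1) (v :: p) = (pvChainF (k + 1) p).map (fun r => v :: r) := by
  intro k
  induction k with
  | zero =>
    intro p q h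
    simp only [pvIterN] at h
    cases h
    exact ⟨rfl, by rw [pvChainF_one, pvChainF_one]; rfl⟩
  | succ k ih =>
    intro p q h
    simp only [pvIterN] at h
    cases hp : pvSigPerm p with
    | none => rw [hp] at h; simp at h
    | some p₁ =>
      rw [hp] at h
      simp only [Option.bind_some] at h
      have hv := pvSigPerm_cons v p p₁ hp
      obtain ⟨hiter, hchain⟩ := ih p₁ q h
      constructor
      · simp only [pvIterN, hv, Option.bind_some]
        exact hiter
      · have e1 : pvChainF (k + 1 + 1) (v :: p) = (v :: p) :: pvChainF (k + 1) (v :: p₁) := by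
          simp [pvChainF, hv]
        have e2 : pvChainF (k + 1 + 1) p = p :: pvChainF (k + 1) p₁ := by
          simp [pvChainF, hp]
        rw [e1, e2, hchain]
        simp

-- ---- selections: permutations as a structural flatMap ----
def pvSel : List Int -> List (Int × List Int)
  | [] => []
  | x :: xs => (x, xs) :: (pvSel xs).map (fun cr => (cr.1, x :: cr.2))

lemma pvSel_eq_range : ∀ (l : List Int),
    pvSel l = (List.range l.length).map (fun i => (l.getD i 0, l.eraseIdx i)) := by
  intro l
  induction l with
  | nil => simp [pvSel]
  | cons x xs ih =>
    simp only [pvSel, ih, List.length_cons, List.range_succ_eq_map, List.map_cons, List.map_map]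
    refine List.cons_eq_cons.mpr ⟨rfl, ?_⟩
    apply List.map_congr_left
    intro i _
    simp [Function.comp]

lemma pvPerm_sel (l : List Int) (r : Nat) :
    PySem.List.permutations l (r + 1)
      = (pvSel l).flatMap (fun cr => (PySem.List.permutations cr.2 r).map (fun p => cr.1 :: p)) := by
  rw [pvPerm_succ, pvSel_eq_range, List.flatMap_map]
  rw [List.flatMap_def, List.flatMap_def]
  congr 1
  apply List.map_congr_left
  intro i hi
  have hilt : i < l.length := List.mem_range.mp hi
  rw [List.getElem?_eq_getElem hilt, List.getD_eq_getElem _ _ hilt]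
  rfl

def pvSelFrom : List Int -> Int -> List Int -> List (Int × List Int)
  | pre, v, [] => [(v, pre)]
  | pre, v, b :: post => (v, pre ++ b :: post) :: pvSelFrom (pre ++ [v]) b post

lemma pvSelFrom_eq_sel : ∀ (post : List Int) (v : Int) (pre : List Int),
    pvSelFrom pre v post = (pvSel (v :: post)).map (fun cr => (cr.1, pre ++ cr.2)) := by
  intro post
  induction post with
  | nil => intro v pre; simp [pvSelFrom, pvSel]
  | cons b post' ih =>
    intro v pre
    simp only [pvSelFrom, pvSel, List.map_cons, List.map_map]
    congr 1
    rw [ih b (pre ++ [v])]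
    rw [show pvSel (b :: post') = (b, post') :: (pvSel post').map (fun cr => (cr.1, b :: cr.2)) from rfl]
    simp [Function.comp]

-- ---- the centerpiece: the chain from a sorted list is the permutations list ----
lemma pvForward (n : Nat)
    (hIH : ∀ t : List Int, t.length = n → List.Pairwise (· < ·) t →
      pvChainF n.factorial t = PySem.List.permutations t n
      ∧ pvIterN (n.factorial - 1) t = some t.reverse) :
    ∀ (post pre : List Int) (v : Int),
      (pre ++ v :: post).length = n + 1 → List.Pairwise (· < ·) (pre ++ v :: post) →
      pvChainF ((post.length + 1) * n.factorial) (v :: (pre ++ post))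
        = (pvSelFrom pre v post).flatMap
            (fun cr => (PySem.List.permutations cr.2 n).map (fun p => cr.1 :: p))
      ∧ pvIterN ((post.length + 1) * n.factorial - 1) (v :: (pre ++ post))
          = some ((pre ++ v :: post).reverse) := by
  have hfac : 1 ≤ n.factorial := Nat.one_le_iff_ne_zero.mpr (Nat.factorial_ne_zero n)
  intro post
  induction post with
  | nil =>
    intro pre v hlen hsort
    have hpl : pre.length = n := by simpa using hlen
    have hps : List.Pairwise (· < ·) pre :=
      hsort.sublist (by simp)
    obtain ⟨hc, hi⟩ := hIH pre hpl hps
    obtain ⟨hi', hc'⟩ := pvChain_cons v (n.factorial - 1) pre pre.reverse hi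
    have hone : (([] : List Int).length + 1) * n.factorial = (n.factorial - 1) + 1 := by
      simp; omega
    constructor
    · rw [hone]
      simp only [List.append_nil]
      rw [hc']
      rw [show n.factorial - 1 + 1 = n.factorial by omega, hc]
      simp [pvSelFrom]
    · rw [hone]
      simp only [List.append_nil, Nat.add_sub_cancel]
      rw [hi']
      simp
  | cons b post' ih =>
    intro pre v hlen hsort
    have hsplit := List.pairwise_append.mp hsort
    have hvb : v < b := (List.pairwise_cons.mp hsplit.2.1).1 b (by simp)
    have hprev : ∀ a ∈ pre, a < v := fun a ha => hsplit.2.2 a ha v (by simp)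
    have htlen : (pre ++ b :: post').length = n := by simp at hlen ⊢; omega
    have htsort : List.Pairwise (· < ·) (pre ++ b :: post') :=
      hsort.sublist (List.Sublist.append_left (List.sublist_cons_self _ _) pre)
    obtain ⟨hc, hi⟩ := hIH (pre ++ b :: post') htlen htsort
    obtain ⟨hi', hc'⟩ := pvChain_cons v (n.factorial - 1) (pre ++ b :: post')
      (pre ++ b :: post').reverse hi
    have hstep : pvSigPerm (v :: (pre ++ b :: post').reverse) = some (b :: (pre ++ v :: post')) :=
      pvSigPerm_block v b pre post' htsort hprev hvb
    have hiterfull : pvIterN n.factorial (v :: (pre ++ b :: post'))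
        = some (b :: (pre ++ v :: post')) := by
      have h1 : n.factorial = (n.factorial - 1) + 1 := by omega
      rw [h1, pvIterN_add, hi']
      simp only [Option.bind_some, pvIterN, hstep]
    have hlen' : ((pre ++ [v]) ++ b :: post').length = n + 1 := by simp at hlen ⊢; omega
    have hsort' : List.Pairwise (· < ·) ((pre ++ [v]) ++ b :: post') := by
      have : (pre ++ [v]) ++ b :: post' = pre ++ v :: b :: post' := by simp
      rw [this]; exact hsort
    obtain ⟨hcI, hiI⟩ := ih (pre ++ [v]) b hlen' hsort'
    have hstate : (pre ++ [v]) ++ post' = pre ++ v :: post' := by simp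
    rw [hstate] at hcI hiI
    have hK : ((b :: post').length + 1) * n.factorial
        = n.factorial + ((post'.length + 1) * n.factorial) := by
      simp only [List.length_cons]; ring
    have hrest1 : 1 ≤ (post'.length + 1) * n.factorial :=
      Nat.one_le_iff_ne_zero.mpr (Nat.mul_ne_zero (by omega) (Nat.factorial_ne_zero n))
    constructor
    · rw [hK, pvChainF_split n.factorial _ _ _ hiterfull]
      have hblock : pvChainF n.factorial (v :: (pre ++ b :: post'))
          = (PySem.List.permutations (pre ++ b :: post') n).map (fun p => v :: p) := by
        have h1 : n.factorial = (n.factorial - 1) + 1 := by omega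
        rw [h1, hc', ← h1, hc]
      rw [hblock, hcI]
      rw [show pvSelFrom pre v (b :: post')
            = (v, pre ++ b :: post') :: pvSelFrom (pre ++ [v]) b post' from rfl]
      rw [List.flatMap_cons]
    · have hK1 : ((b :: post').length + 1) * n.factorial - 1
          = n.factorial + ((post'.length + 1) * n.factorial - 1) := by
        rw [hK]; omega
      rw [hK1, pvIterN_add, hiterfull]
      simp only [Option.bind_some]
      rw [hiI]
      congr 1
      have : (pre ++ [v]) ++ b :: post' = pre ++ v :: b :: post' := by simp
      rw [this]

lemma pvChain_main : ∀ (L : Nat) (s : List Int), s.length = L → List.Pairwise (· < ·) s →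
    pvChainF L.factorial s = PySem.List.permutations s L
    ∧ pvIterN (L.factorial - 1) s = some s.reverse := by
  intro L
  induction L with
  | zero =>
    intro s hl _
    have : s = [] := List.eq_nil_of_length_eq_zero hl
    subst this
    constructor
    · rw [show Nat.factorial 0 = 1 from rfl, pvChainF_one]
      rfl
    · rfl
  | succ n ihn =>
    intro s hl hs
    obtain ⟨v, tail, rfl⟩ : ∃ v tail, s = v :: tail := by
      cases s with
      | nil => simp at hl
      | cons a l => exact ⟨_, _, rfl⟩
    have htl : tail.length = n := by simpa using hl
    have hfor := pvForward n ihn tail [] v (by simpa using hl) (by simpa using hs)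
    simp only [List.nil_append] at hfor
    have hfact : (n + 1).factorial = (tail.length + 1) * n.factorial := by
      rw [htl, Nat.factorial_succ]
    constructor
    · rw [hfact, hfor.1, pvSelFrom_eq_sel, pvPerm_sel, List.flatMap_map]
      simp
    · rw [hfact]
      exact hfor.2

-- ---- loop to chain ----
lemma pvLoop_eq (maxr : Option Int) (c0 : Int) :
    ∀ (f : Nat) (p : List Int) (res : List (List Int)),
      pvLoop maxr c0 f p res
        = res ++ pvCapTake maxr res.length ((pvChainF f p).map (fun r => c0 :: r)) := by
  intro f
  induction f with
  | zero => intro p res; simp [pvLoop, pvChainF, pvCapTake_nil]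
  | succ f ih =>
    intro p res
    by_cases hcap : pvTruthyCap maxr res.length
    · simp [pvLoop, hcap, pvCapTake_of_reached _ _ hcap]
    · simp only [Bool.not_eq_true] at hcap
      simp only [pvLoop, hcap, Bool.false_eq_true, if_false]
      cases hp : pvSigPerm p with
      | none =>
        simp only [pvChainF, hp, List.map_cons]
        rw [pvCapTake_cons _ _ _ _ hcap]
        simp [pvCapTake_nil]
      | some a' =>
        simp only [pvChainF, hp, List.map_cons]
        rw [pvCapTake_cons _ _ _ _ hcap]
        rw [ih a' (res ++ [c0 :: p])]
        simp
-- ---- the city list is strictly increasing ----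
lemma pvRange_pairwise (a b : Int) :
    List.Pairwise (· < ·) (PySem.List.pyRange a b 1) := by
  have h : ∃ cnt, PySem.List.pyRange a b 1
      = (List.range cnt).map (fun k : Nat => a + 1 * (k : Int)) := by
    simp only [PySem.List.pyRange]
    norm_num
    exact ⟨_, rfl⟩
  obtain ⟨cnt, hc⟩ := h
  rw [hc]
  refine List.Pairwise.map _ ?_ (List.pairwise_lt_range)
  intro i j hij
  omega

-- ===== VERDICT (by name: the statement is the Claim_ definition above) =====
theorem obtener_todas_rutas_spec : Claim_equal_obtener_todas_rutas := by
  intro n maxr _ _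
  unfold Spec_obtener_todas_rutas obtener_todas_rutas obtener_todas_rutas_alt
  cases h : PySem.List.pyGet? (PySem.List.pyRange 0 n 1) 0 with
  | none => simp only [h]
  | some c0 =>
    simp only [h]
    rw [pvGenA_eq maxr _ _ rfl 0]
    rw [pvCapTake_map]
    rw [pvLoop_eq]
    have hsorted : List.Pairwise (· < ·) (PySem.List.slice (PySem.List.pyRange 0 n 1) (some 1) none) := by
      rw [PySem.List.slice_from _ (by omega : (0:Int) ≤ 1)]
      exact (pvRange_pairwise 0 n).sublist (List.drop_sublist _ _)
    rw [(pvChain_main _ _ rfl hsorted).1]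
    simp
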